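-- pv_equiv track=rewrite | github.com/irishNoah/Algorithm-Study | 알고리즘/파이썬(Python)/010-스택&큐&데크/002-[프로그래머스]-파이썬-스택-(과일-장수)-LV1-(1-내풀이-정답)-스택활용.py | solution
-- ===== SOURCE A (Python) =====
-- def solution(k, m, score):
--
--     stack = []
--     score.sort() # 스택 활용하기 위한 오름차순 정렬
--
--     answer = 0 # 최대 이익
--     while True:
--         if len(stack) == m:
--             answer += stack[-1] * m * 1
--             stack.clear() # 스택 비워버리기
--
--         if len(score) == 0: # while문 종료 조건
--             break
--
--         stack.append(score.pop())
--
--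
--     return answer
-- ===== SOURCE B (Python) =====
-- def solution(k, m, score):
--     # Different decomposition: sort once descending, then sum every m-th element
--     # (the minimum of each full group of m) directly by index; no stack, no popping.
--     # Unlike A, this does not mutate `score` in place.
--     desc = sorted(score)[::-1]
--     return m * sum(desc[i] for i in range(m - 1, len(desc), m))
-- ===== Notes on version B (the rewrite author's own statement) =====
-- stated objective: simpler
-- what changed: A simulates a stack, repeatedly popping the sorted list and clearing the stack each time it fills; B sorts once descending and directly sums every m-th element (the minimum of each full group) with a single indexed range, no stack and no mutation of score.
import Mathlib
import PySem

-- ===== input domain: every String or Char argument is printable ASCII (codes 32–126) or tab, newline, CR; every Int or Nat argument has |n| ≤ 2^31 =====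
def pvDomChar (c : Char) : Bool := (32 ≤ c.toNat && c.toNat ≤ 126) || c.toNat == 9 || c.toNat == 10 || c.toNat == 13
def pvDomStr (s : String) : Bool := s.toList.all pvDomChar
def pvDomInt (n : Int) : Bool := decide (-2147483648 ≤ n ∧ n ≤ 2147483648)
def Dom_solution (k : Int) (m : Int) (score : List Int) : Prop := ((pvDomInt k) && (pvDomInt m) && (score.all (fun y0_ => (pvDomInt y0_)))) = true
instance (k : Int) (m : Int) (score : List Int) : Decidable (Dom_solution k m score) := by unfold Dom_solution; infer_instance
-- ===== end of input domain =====

-- B replaces A's stack-and-pop loop by one direct indexed sum of every m-th element of the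
-- descending sort (simpler, no stack); A sorts and empties `score` in place — the equivalence
-- proved here is about the RETURN value only (B does not mutate its argument).

-- ===== PORT A =====
-- while-True loop of A: state = (stack, score, answer); pops from the end of score
def loopA (m : Int) (stack : List Int) (score : List Int) (answer : Int) : Int :=
  let stack' := if (stack.length : Int) = m then [] else stack
  let answer' := if (stack.length : Int) = m then answer + PySem.List.pyGetD stack (-1) 0 * m * 1 else answer
  if h : score = [] then answer'
  else loopA m (stack' ++ [PySem.List.pyGetD score (-1) 0]) score.dropLast answer'
termination_by score.length
decreasing_by
  have hp : 0 < score.length := List.length_pos_iff.mpr h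
  simp [List.length_dropLast]; omega

def solution (k : Int) (m : Int) (score : List Int) : Int :=
  loopA m [] (PySem.List.sorted score (fun x => x) false) 0

-- ===== PORT B =====
def solution_alt (k : Int) (m : Int) (score : List Int) : Int :=
  let desc := (PySem.List.slice? (PySem.List.sorted score (fun x => x) false) none none (-1)).getD []
  m * ((PySem.List.pyRange (m - 1) (desc.length : Int) m).map (fun i => PySem.List.pyGetD desc i 0)).sum

-- ===== PRECONDITION & SPEC =====
-- Pre_ excludes only m = 0, where A raises IndexError (stack[-1] on an empty stack)
-- and B raises ValueError (range step 0).
def Pre_solution (k : Int) (m : Int) (score : List Int) : Prop := m ≠ 0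
instance (k : Int) (m : Int) (score : List Int) : Decidable (Pre_solution k m score) := by unfold Pre_solution; infer_instance
def pvWitness_solution : Int × Int × List Int := (4, 3, [4, 1, 2, 2, 4, 2, 4])

def Spec_solution (k : Int) (m : Int) (score : List Int) (out : Int) : Prop := out = solution_alt k m score
instance (k : Int) (m : Int) (score : List Int) (out : Int) : Decidable (Spec_solution k m score out) := by unfold Spec_solution; infer_instance

-- ===== CLAIM (what is proved, stated in full; the proofs are below) =====
def Claim_equal_solution : Prop := ∀ (k : Int) (m : Int) (score : List Int), Dom_solution k m score → Pre_solution k m score → Spec_solution k m score (solution k m score)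

-- ===== LEMMAS AND PROOFS =====

-- sum of the last element of each full group of mN, reading d in consumption order,
-- with j elements already in the current group
def grp (mN : Nat) : Nat → List Int → Int
  | _, [] => 0
  | j, x :: t => if j + 1 = mN then x + grp mN 0 t else grp mN (j + 1) t

-- loopA with the still-to-pop part of score already reversed (structural recursion)
def loopR (m : Int) (stack : List Int) (rs : List Int) (answer : Int) : Int :=
  match rs with
  | [] => if (stack.length : Int) = m then answer + PySem.List.pyGetD stack (-1) 0 * m * 1 else answer
  | x :: t =>
    if (stack.length : Int) = m then
      loopR m ([] ++ [x]) t (answer + PySem.List.pyGetD stack (-1) 0 * m * 1)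
    else loopR m (stack ++ [x]) t answer

lemma pyGetD_concat_neg_one (xs : List Int) (x : Int) :
    PySem.List.pyGetD (xs ++ [x]) (-1) 0 = x := by
  simp [PySem.List.pyGetD, PySem.List.pyIdx?, PySem.List.pyGet?]

lemma loopA_eq_loopR (m : Int) (score : List Int) : ∀ (stack : List Int) (ans : Int),
    loopA m stack score ans = loopR m stack score.reverse ans := by
  induction score using List.reverseRecOn with
  | nil => intro stack ans; rw [loopA]; simp [loopR]
  | append_singleton ys x ih =>
    intro stack ans
    rw [loopA, dif_neg (by simp : ¬ (ys ++ [x] = []))]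
    rw [List.dropLast_concat, pyGetD_concat_neg_one]
    have hrev : (ys ++ [x]).reverse = x :: ys.reverse := by simp
    rw [hrev, loopR]
    split_ifs with hif
    · exact ih _ _
    · exact ih _ _

lemma loopR_neg (m : Int) (hm : m < 0) : ∀ (rs stack : List Int) (ans : Int),
    loopR m stack rs ans = ans := by
  intro rs
  induction rs with
  | nil => intro stack ans; rw [loopR, if_neg (by omega)]
  | cons x t ih => intro stack ans; rw [loopR, if_neg (by omega)]; exact ih _ _

lemma loopR_pos (m : Int) (hm : 1 ≤ m) : ∀ (rs stack : List Int) (ans : Int),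
    stack.length ≤ m.toNat →
    loopR m stack rs ans = ans +
      (if stack.length = m.toNat
       then m * PySem.List.pyGetD stack (-1) 0 + m * grp m.toNat 0 rs
       else m * grp m.toNat stack.length rs) := by
  intro rs
  induction rs with
  | nil =>
    intro stack ans hlen
    rw [loopR]
    split_ifs with h1 h2 h2
    · simp [grp]; ring
    · exact absurd (by omega : stack.length = m.toNat) h2
    · exact absurd (by omega : (stack.length : Int) = m) h1
    · simp [grp]
  | cons x t ih =>
    intro stack ans hlen
    rw [loopR]
    by_cases h1 : (stack.length : Int) = m
    · have h1' : stack.length = m.toNat := by omega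
      rw [if_pos h1, if_pos h1', ih ([] ++ [x]) _ (by simp; omega)]
      simp only [List.nil_append, List.length_singleton, grp]
      by_cases h2 : 1 = m.toNat
      · rw [if_pos h2, if_pos (by omega : 0 + 1 = m.toNat)]
        have hx : PySem.List.pyGetD [x] (-1) 0 = x := by
          simp [PySem.List.pyGetD, PySem.List.pyIdx?, PySem.List.pyGet?]
        rw [hx]; ring
      · rw [if_neg h2, if_neg (by omega : ¬ (0 + 1 = m.toNat))]; ring
    · have h1' : ¬ stack.length = m.toNat := by omega
      rw [if_neg h1, if_neg h1', ih (stack ++ [x]) _ (by simp; omega)]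
      simp only [List.length_append, List.length_singleton, pyGetD_concat_neg_one, grp]
      by_cases h2 : stack.length + 1 = m.toNat
      · rw [if_pos h2, if_pos h2]; ring
      · rw [if_neg h2, if_neg h2]

lemma pyRange_shift (a b s : Int) (hs : 0 < s) :
    PySem.List.pyRange a b s = (PySem.List.pyRange (a - 1) (b - 1) s).map (fun i => i + 1) := by
  rw [PySem.List.pyRange_of_pos _ _ hs, PySem.List.pyRange_of_pos _ _ hs, List.map_map]
  have hc : (if a < b then ((b - a + s - 1) / s).toNat else 0)
      = (if a - 1 < b - 1 then ((b - 1 - (a - 1) + s - 1) / s).toNat else 0) := by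
    by_cases h : a < b
    · rw [if_pos h, if_pos (by omega)]
      have he : b - a + s - 1 = b - 1 - (a - 1) + s - 1 := by ring
      rw [he]
    · rw [if_neg h, if_neg (by omega)]
  rw [hc]
  apply List.map_congr_left
  intro j _
  simp only [Function.comp]
  ring

lemma pyRange_shift' (a b s : Int) (hs : 0 < s) :
    PySem.List.pyRange (a + 1) (b + 1) s = (PySem.List.pyRange a b s).map (fun i => i + 1) := by
  have h := pyRange_shift (a + 1) (b + 1) s hs
  simpa using h

lemma pyRange_cons (a b s : Int) (hs : 0 < s) (hab : a < b) :
    PySem.List.pyRange a b s = a :: PySem.List.pyRange (a + s) b s := by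
  rw [PySem.List.pyRange_of_pos _ _ hs, PySem.List.pyRange_of_pos _ _ hs, if_pos hab]
  have hcount : ((b - a + s - 1) / s).toNat
      = (if a + s < b then ((b - (a + s) + s - 1) / s).toNat else 0) + 1 := by
    by_cases h2 : a + s < b
    · rw [if_pos h2]
      have he : b - a + s - 1 = (b - (a + s) + s - 1) + 1 * s := by ring
      rw [he, Int.add_mul_ediv_right _ _ (by omega : s ≠ 0)]
      have h0 : 0 ≤ (b - (a + s) + s - 1) / s := Int.ediv_nonneg (by omega) (by omega)
      omega
    · rw [if_neg h2]
      have he : b - a + s - 1 = (b - a - 1) + 1 * s := by ring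
      rw [he, Int.add_mul_ediv_right _ _ (by omega : s ≠ 0)]
      have h1 : (b - a - 1) / s = 0 := Int.ediv_eq_zero_of_lt (by omega) (by omega)
      omega
  rw [hcount, List.range_succ_eq_map, List.map_cons, List.map_map]
  congr 1
  · simp
  · apply List.map_congr_left
    intro j _
    simp only [Function.comp, Nat.succ_eq_add_one]
    push_cast
    ring

lemma pyRange_neg_empty (a b s : Int) (hs : s < 0) (hab : a ≤ b) :
    PySem.List.pyRange a b s = [] := by
  rw [PySem.List.pyRange]
  rw [if_neg (by omega : ¬ s = 0)]
  simp only [if_neg (by omega : ¬ 0 < s), if_neg (by omega : ¬ b < a)]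
  simp

lemma sumIdx (m : Int) (hm : 1 ≤ m) : ∀ (d : List Int) (j : Nat), (j : Int) < m →
    ((PySem.List.pyRange (m - 1 - j) (d.length : Int) m).map
        (fun i => PySem.List.pyGetD d i 0)).sum = grp m.toNat j d := by
  intro d
  induction d with
  | nil =>
    intro j hj
    rw [PySem.List.pyRange_of_pos _ _ (by omega), if_neg (by simp; omega)]
    simp [grp]
  | cons x t ih =>
    intro j hj
    have hshift : ∀ (a : Int), PySem.List.pyRange (a + 1) (((x :: t).length : Int)) m
        = (PySem.List.pyRange a ((t.length : Int)) m).map (fun i => i + 1) := by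
      intro a
      have h2 : (((x :: t).length : Int)) = ((t.length : Int)) + 1 := by
        simp [List.length_cons]
      rw [h2, pyRange_shift' _ _ _ (by omega)]
    have hcong : ∀ (a : Int), 0 ≤ a →
        ((PySem.List.pyRange a ((t.length : Int)) m).map
          ((fun i => PySem.List.pyGetD (x :: t) i 0) ∘ (fun i => i + 1))).sum
        = ((PySem.List.pyRange a ((t.length : Int)) m).map
          (fun i => PySem.List.pyGetD t i 0)).sum := by
      intro a ha
      congr 1
      apply List.map_congr_left
      intro i hi
      have h0 : 0 ≤ i := by
        have := (PySem.List.mem_pyRange_iff_of_pos (by omega : (0:Int) < m) i).mp hi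
        omega
      simp only [Function.comp]
      rw [PySem.List.pyGetD_of_nonneg _ _ (by omega), PySem.List.pyGetD_of_nonneg _ _ h0]
      have ht : (i + 1).toNat = i.toNat + 1 := by omega
      rw [ht]
      simp
    by_cases h2 : (j : Int) + 1 = m
    · have hstart : m - 1 - (j : Int) = 0 := by omega
      rw [hstart, pyRange_cons 0 _ m (by omega) (by simp)]
      have h0m : PySem.List.pyRange (0 + m) (((x :: t).length : Int)) m
          = (PySem.List.pyRange (m - 1) ((t.length : Int)) m).map (fun i => i + 1) := by
        have he : (0 : Int) + m = (m - 1) + 1 := by ring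
        rw [he, hshift]
      rw [List.map_cons, h0m, List.map_map, List.sum_cons, hcong (m - 1) (by omega)]
      have h00 : ((0:Nat) : Int) < m := by omega
      have hih := ih 0 h00
      simp only [Nat.cast_zero, sub_zero] at hih
      rw [hih]
      have hx : PySem.List.pyGetD (x :: t) 0 0 = x := by
        simp [PySem.List.pyGetD, PySem.List.pyIdx?, PySem.List.pyGet?]
      rw [hx]
      simp only [grp, if_pos (by omega : j + 1 = m.toNat)]
    · have he : m - 1 - (j : Int) = (m - 1 - ((j:Int) + 1)) + 1 := by ring
      rw [he, hshift, List.map_map, hcong _ (by omega)]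
      have hj1 : ((j + 1 : Nat) : Int) < m := by push_cast; omega
      have he2 : m - 1 - ((j:Int) + 1) = m - 1 - ((j + 1 : Nat) : Int) := by push_cast; ring
      rw [he2, ih (j + 1) hj1]
      simp only [grp, if_neg (by omega : ¬ j + 1 = m.toNat)]

-- ===== VERDICT (by name: the statement is the Claim_ definition above) =====
theorem solution_spec : Claim_equal_solution := by
  intro k m score _ hpre
  unfold Spec_solution solution solution_alt
  rw [loopA_eq_loopR]
  rw [PySem.List.slice?_none_none_neg_one]
  simp only [Option.getD_some]
  set s := PySem.List.sorted score (fun x => x) false with hs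
  rcases lt_or_gt_of_ne hpre with hneg | hpos
  · rw [loopR_neg m hneg]
    rw [pyRange_neg_empty _ _ _ (by omega) (by simp; omega)]
    simp
  · have hm : 1 ≤ m := hpos
    rw [loopR_pos m hm s.reverse [] 0 (by simp)]
    rw [if_neg (by simp; omega : ¬ ([] : List Int).length = m.toNat)]
    have := sumIdx m hm s.reverse 0 (by omega)
    simp only [Nat.cast_zero, sub_zero] at this
    rw [List.length_nil, this, zero_add]
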